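-- pv_equiv track=rewrite | github.com/yizhiwang96/deepvecfont | data_utils/svg_utils.py | _separate_substructures
-- ===== SOURCE A (Python) =====
-- def _separate_substructures(path):
--     """Returns a list of subpaths, each representing substructures the glyph."""
--     substructures = []
--     curr = []
--     for cmd in path:
--         if cmd[0] in 'mM' and curr:
--             substructures.append(curr)
--             curr = []
--         curr.append(cmd)
--     if curr:
--         substructures.append(curr)
--     return substructures
-- ===== SOURCE B (Python) =====
-- def _separate_substructures(path):
--     """Build the subpath list back-to-front: scan path in reverse and prepend
--     each command to the front group unless that group starts with a move."""
--     subs = []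
--     for cmd in reversed(path):
--         if subs and subs[0][0][0] not in 'mM':
--             subs[0] = [cmd] + subs[0]
--         else:
--             subs = [[cmd]] + subs
--     return subs
-- ===== Notes on version B (the rewrite author's own statement) =====
-- stated objective: alternative
-- what changed: Replaces A's forward accumulate-and-flush loop (pending 'curr' buffer flushed at each move and at the end) with a reverse scan that builds the result back-to-front, prepending each command into the front group unless that group starts with a move command.
import Mathlib
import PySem

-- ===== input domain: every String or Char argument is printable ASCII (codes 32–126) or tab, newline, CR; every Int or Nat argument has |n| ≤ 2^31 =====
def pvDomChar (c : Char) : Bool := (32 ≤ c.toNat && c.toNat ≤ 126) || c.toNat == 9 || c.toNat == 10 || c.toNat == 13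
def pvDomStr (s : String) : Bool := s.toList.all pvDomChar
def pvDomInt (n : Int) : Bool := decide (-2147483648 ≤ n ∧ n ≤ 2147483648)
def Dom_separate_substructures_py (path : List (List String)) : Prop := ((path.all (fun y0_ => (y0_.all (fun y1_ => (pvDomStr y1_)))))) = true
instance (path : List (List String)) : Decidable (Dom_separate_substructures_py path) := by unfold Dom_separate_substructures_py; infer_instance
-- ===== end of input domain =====

-- B builds the subpath list back-to-front with a reverse scan (foldr merging into the
-- head group) instead of A's forward accumulate-and-flush loop; objective: alternative.

-- `cmd[0] in 'mM'` — first string of a command tested as a substring of "mM".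
-- `(pyGet? cmd 0).getD ""` ports `cmd[0]`; exact on Pre_ (commands nonempty; Python raises on []).
def pvIsMove (cmd : List String) : Bool := PySem.Str.isIn ((PySem.List.pyGet? cmd 0).getD "") "mM"

-- ===== PORT A =====
-- one loop iteration of A: flush curr at a move, then append cmd to curr
def pvStepA (st : List (List (List String)) × List (List String)) (cmd : List String) :
    List (List (List String)) × List (List String) :=
  if pvIsMove cmd && !st.2.isEmpty then (st.1 ++ [st.2], [cmd]) else (st.1, st.2 ++ [cmd])

def separate_substructures_py (path : List (List String)) : List (List (List String)) :=
  let st := path.foldl pvStepA ([], [])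
  if !st.2.isEmpty then st.1 ++ [st.2] else st.1

-- ===== PORT B =====
-- one reverse-loop iteration of B: prepend cmd to the front group unless it starts with a move
-- `subs[0][0][0] not in 'mM'` → pvIsMove of the front group's head command (headD: exact, group nonempty)
def pvStepB (cmd : List String) (subs : List (List (List String))) : List (List (List String)) :=
  match subs with
  | [] => [[cmd]]
  | g :: gs => if !(pvIsMove (g.headD [])) then (cmd :: g) :: gs else [cmd] :: g :: gs

def separate_substructures_py_alt (path : List (List String)) : List (List (List String)) :=
  path.foldr pvStepB []

-- ===== PRECONDITION & SPEC =====
-- Pre_ excludes paths containing an empty command, on which Python A raises IndexError at cmd[0].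
def Pre_separate_substructures_py (path : List (List String)) : Prop :=
  ∀ cmd ∈ path, cmd ≠ []
instance (path : List (List String)) : Decidable (Pre_separate_substructures_py path) := by
  unfold Pre_separate_substructures_py; infer_instance

def pvWitness_separate_substructures_py : List (List String) :=
  [["m", "0", "0"], ["l", "1", "1"], ["M", "2", "2"], ["z"]]

def Spec_separate_substructures_py (path : List (List String)) (out : List (List (List String))) : Prop := out = separate_substructures_py_alt path
instance (path : List (List String)) (out : List (List (List String))) : Decidable (Spec_separate_substructures_py path out) := by unfold Spec_separate_substructures_py; infer_instance

-- ===== CLAIM (what is proved, stated in full; the proofs are below) =====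
def Claim_equal_separate_substructures_py : Prop := ∀ (path : List (List String)), Dom_separate_substructures_py path → Pre_separate_substructures_py path → Spec_separate_substructures_py path (separate_substructures_py path)

-- ===== LEMMAS AND PROOFS =====

-- pvMerge curr bs: attach the pending group curr in front of an already-built suffix result
def pvMerge (curr : List (List String)) (bs : List (List (List String))) : List (List (List String)) :=
  match bs with
  | [] => [curr]
  | g :: gs => if pvIsMove (g.headD []) then curr :: g :: gs else (curr ++ g) :: gs

theorem pvStepB_eq_merge (cmd : List String) (bs : List (List (List String))) :
    pvStepB cmd bs = pvMerge [cmd] bs := by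
  cases bs with
  | nil => rfl
  | cons g gs => simp only [pvStepB, pvMerge]; split_ifs with h <;> simp_all

theorem pvMerge_head (cmd : List String) (bs : List (List (List String))) :
    ((pvMerge [cmd] bs).headD []).headD [] = cmd := by
  cases bs with
  | nil => rfl
  | cons g gs => simp only [pvMerge]; split_ifs <;> rfl

theorem pvMerge_move (curr : List (List String)) (cmd : List String) (bs : List (List (List String)))
    (hm : pvIsMove cmd = true) :
    pvMerge curr (pvMerge [cmd] bs) = curr :: pvMerge [cmd] bs := by
  have h := pvMerge_head cmd bs
  cases hbs : pvMerge [cmd] bs with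
  | nil => cases bs <;> simp [pvMerge] at hbs; split_ifs at hbs
  | cons g gs =>
      rw [hbs] at h
      have hg : g.head?.getD [] = cmd := by simpa using h
      simp [pvMerge, hg, hm]

theorem pvMerge_snoc (curr : List (List String)) (cmd : List String) (bs : List (List (List String)))
    (hm : pvIsMove cmd = false) :
    pvMerge (curr ++ [cmd]) bs = pvMerge curr (pvMerge [cmd] bs) := by
  cases bs with
  | nil => simp [pvMerge, hm]
  | cons g gs =>
      simp only [pvMerge]
      split_ifs with h <;> simp [hm, List.append_assoc]

theorem pvLoop_eq (path : List (List String)) :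
    ∀ (subs : List (List (List String))) (curr : List (List String)), curr ≠ [] →
    (let st := path.foldl pvStepA (subs, curr)
     if !st.2.isEmpty then st.1 ++ [st.2] else st.1) =
      subs ++ pvMerge curr (path.foldr pvStepB []) := by
  induction path with
  | nil => intro subs curr hc; simp [pvMerge, hc]
  | cons cmd rest ih =>
      intro subs curr hc
      simp only [List.foldl_cons, List.foldr_cons, pvStepB_eq_merge]
      by_cases hm : pvIsMove cmd = true
      · have hstep : pvStepA (subs, curr) cmd = (subs ++ [curr], [cmd]) := by
          simp [pvStepA, hm, hc]
        rw [hstep, ih (subs ++ [curr]) [cmd] (by simp),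
            pvMerge_move curr cmd _ hm]
        simp
      · have hm' : pvIsMove cmd = false := by simpa using hm
        have hstep : pvStepA (subs, curr) cmd = (subs, curr ++ [cmd]) := by
          simp [pvStepA, hm']
        rw [hstep, ih subs (curr ++ [cmd]) (by simp),
            pvMerge_snoc curr cmd _ hm']

-- ===== VERDICT (by name: the statement is the Claim_ definition above) =====
theorem separate_substructures_py_spec : Claim_equal_separate_substructures_py := by
  intro path _ _
  unfold Spec_separate_substructures_py separate_substructures_py separate_substructures_py_alt
  cases path with
  | nil => rfl
  | cons cmd rest =>
      simp only [List.foldl_cons, List.foldr_cons]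
      have hstep : pvStepA ([], []) cmd = ([], [cmd]) := by simp [pvStepA]
      rw [hstep, pvStepB_eq_merge]
      simpa using pvLoop_eq rest [] [cmd] (by simp)
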